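-- pv_equiv track=rewrite | github.com/Matthew-Pidlysny/9-The-Final-Chapter | Composer (Research Tote)/prime_composition_tool_3_hardness_analyzer.py | _is_reptend_prime
-- ===== SOURCE A (Python) =====
-- def _is_reptend_prime(p: int) -> bool:
--     """Check if p is a reptend prime."""
--     if p == 2 or p == 5:
--         return False
--
--     # Calculate period of 1/p
--     remainder = 1
--     remainders_seen = {}
--     position = 0
--
--     while remainder != 0 and remainder not in remainders_seen:
--         remainders_seen[remainder] = position
--         remainder = (remainder * 10) % p
--         position += 1
--
--     period = position if remainder == 0 else position - remainders_seen[remainder]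
--     return period == p - 1
-- ===== SOURCE B (Python) =====
-- def _is_reptend_prime(p: int) -> bool:
--     """Check if p is a reptend prime.
--
--     p is a full reptend prime iff the multiplicative order of 10 modulo p
--     is exactly p - 1 (which forces p to be prime, so no separate primality
--     test is needed): check 10^(p-1) = 1 (mod p) and 10^((p-1)//q) != 1
--     (mod p) for every prime factor q of p - 1.
--     """
--     if p < 3 or p == 5:
--         return False
--     n = p - 1
--     if pow(10, n, p) != 1:
--         return False
--     m = n
--     q = 2
--     while q * q <= m:
--         if m % q == 0:
--             if pow(10, n // q, p) == 1:
--                 return False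
--             while m % q == 0:
--                 m //= q
--         q += 1
--     if m > 1 and pow(10, n // m, p) == 1:
--         return False
--     return True
-- ===== Notes on version B (the rewrite author's own statement) =====
-- stated objective: faster
-- what changed: A simulates the long division of 1/p, stepping remainder = remainder*10 % p up to p-1 times with a dict of seen remainders to find the decimal period; B never iterates the remainder sequence: it tests whether the multiplicative order of 10 mod p is exactly p-1 (which is equivalent, and forces p prime) by one modular exponentiation 10^(p-1) mod p plus trial-division factoring of p-1 with one exponentiation 10^((p-1)/q) mod p per prime factor q.
import Mathlib
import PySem

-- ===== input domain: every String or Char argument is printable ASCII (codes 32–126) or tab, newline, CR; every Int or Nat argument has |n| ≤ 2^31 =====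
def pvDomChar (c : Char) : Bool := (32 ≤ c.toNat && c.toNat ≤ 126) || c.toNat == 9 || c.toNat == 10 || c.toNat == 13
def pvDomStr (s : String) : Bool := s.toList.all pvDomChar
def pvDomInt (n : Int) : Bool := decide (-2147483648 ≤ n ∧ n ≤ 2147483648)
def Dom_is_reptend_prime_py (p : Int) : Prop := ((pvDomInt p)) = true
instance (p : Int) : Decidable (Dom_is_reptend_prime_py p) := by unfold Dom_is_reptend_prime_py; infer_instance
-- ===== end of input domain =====

-- B replaces A's O(p) long-division simulation (remainder loop + dict of seen remainders)
-- by a multiplicative-order test: 10^(p-1) ≡ 1 (mod p) and 10^((p-1)/q) ≢ 1 for every prime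
-- factor q of p-1, found by trial division — asymptotically faster (objective: faster).


-- ===== PORT A =====
-- the while loop, with fuel 2*|p|+2 (provably more than the number of iterations: each
-- iteration inserts a fresh key drawn from {1} ∪ (range of `% p`), a set of ≤ |p|+1 values)
def aLoop (p : Int) : Nat → Int → PySem.Dict Int Int → Int → Int × PySem.Dict Int Int × Int
  | 0, r, seen, pos => (r, seen, pos)
  | fuel+1, r, seen, pos =>
      if r ≠ 0 ∧ seen.contains r = false then
        aLoop p fuel (PySem.Int.mod (r * 10) p) (seen.insert r pos) (pos + 1)
      else (r, seen, pos)

def is_reptend_prime_py (p : Int) : Bool :=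
  if p = 2 ∨ p = 5 then false
  else
    let s := aLoop p (2 * p.natAbs + 2) 1 PySem.Dict.empty 0
    -- at loop exit with s.1 ≠ 0 the key s.1 is in the dict, so getD's default is never read
    let period : Int := if s.1 = 0 then s.2.2 else s.2.2 - s.2.1.getD s.1 0
    decide (period = p - 1)

-- ===== PORT B =====
-- inner `while m % q == 0: m //= q`, fuel m.natAbs (≥ multiplicity of q in m since q ≥ 2)
def stripLoop (q : Int) : Nat → Int → Int
  | 0, m => m
  | fuel+1, m => if PySem.Int.mod m q = 0 then stripLoop q fuel (PySem.Int.floordiv m q) else m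

-- outer trial-division loop; returns (False on an early `return False`, final m);
-- fuel |n|+2 suffices since q increases every iteration and the loop needs q*q ≤ m ≤ n.
-- exponents n//q, n//m are ≥ 0 here, so `.toNat` is exact
def bLoop (p n : Int) : Nat → Int → Int → Bool × Int
  | 0, m, _ => (true, m)
  | fuel+1, m, q =>
      if q * q ≤ m then
        if PySem.Int.mod m q = 0 then
          if PySem.Int.powMod 10 (PySem.Int.floordiv n q).toNat p = 1 then (false, m)
          else bLoop p n fuel (stripLoop q m.natAbs m) (q + 1)
        else bLoop p n fuel m (q + 1)
      else (true, m)

def is_reptend_prime_py_alt (p : Int) : Bool :=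
  if p < 3 ∨ p = 5 then false
  else
    let n := p - 1
    if PySem.Int.powMod 10 n.toNat p ≠ 1 then false
    else
      let r := bLoop p n (n.natAbs + 2) n 2
      if r.1 = false then false
      else if 1 < r.2 ∧ PySem.Int.powMod 10 (PySem.Int.floordiv n r.2).toNat p = 1 then false
      else true

-- ===== PRECONDITION & SPEC =====
-- Pre_ excludes only p = 0, where A raises ZeroDivisionError at `(remainder * 10) % p`.
def Pre_is_reptend_prime_py (p : Int) : Prop := p ≠ 0
instance (p : Int) : Decidable (Pre_is_reptend_prime_py p) := by unfold Pre_is_reptend_prime_py; infer_instance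
def pvWitness_is_reptend_prime_py : Int := 7

def Spec_is_reptend_prime_py (p : Int) (out : Bool) : Prop := out = is_reptend_prime_py_alt p
instance (p : Int) (out : Bool) : Decidable (Spec_is_reptend_prime_py p out) := by unfold Spec_is_reptend_prime_py; infer_instance

-- ===== CLAIM (what is proved, stated in full; the proofs are below) =====
def Claim_equal_is_reptend_prime_py : Prop := ∀ (p : Int), Dom_is_reptend_prime_py p → Pre_is_reptend_prime_py p → Spec_is_reptend_prime_py p (is_reptend_prime_py p)

-- ===== LEMMAS AND PROOFS =====

-- the common arithmetical condition both programs decide (P = p.toNat):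
-- "the multiplicative order of 10 modulo P is exactly P - 1"
def SCond (P : Nat) : Prop := 10^(P-1) % P = 1 ∧ ∀ k, 0 < k → k < P-1 → 10^k % P ≠ 1

-- ---------- A-side model ----------
-- the remainder sequence of A's loop
def rseq (p : Int) : Nat → Int
  | 0 => 1
  | k+1 => PySem.Int.mod (rseq p k * 10) p

-- the dict A's loop has built after n iterations
def dictUpTo (p : Int) (n : Nat) : PySem.Dict Int Int :=
  (List.range n).foldl (fun d i => d.insert (rseq p i) (i : Int)) PySem.Dict.empty

-- loop-exit condition at step k
def BadN (p : Int) (k : Nat) : Prop := rseq p k = 0 ∨ ∃ i < k, rseq p i = rseq p k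

-- ---------- B-side Nat model ----------
def stripN (q : Nat) : Nat → Nat → Nat
  | 0, m => m
  | fuel+1, m => if m % q = 0 then stripN q fuel (m / q) else m

def bN (P n : Nat) : Nat → Nat → Nat → Bool × Nat
  | 0, m, _ => (true, m)
  | fuel+1, m, q =>
      if q * q ≤ m then
        if m % q = 0 then
          if 10^(n / q) % P = 1 then (false, m)
          else bN P n fuel (stripN q m m) (q + 1)
        else bN P n fuel m (q + 1)
      else (true, m)

-- ---------- lemmas (A side) ----------
theorem dictUpTo_succ (p : Int) (n : Nat) :
    dictUpTo p (n+1) = (dictUpTo p n).insert (rseq p n) (n : Int) := by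
  simp [dictUpTo, List.range_succ]

theorem contains_dictUpTo (p : Int) (n : Nat) (x : Int) :
    (dictUpTo p n).contains x = true ↔ ∃ i < n, rseq p i = x := by
  induction n with
  | zero => simp [dictUpTo, PySem.Dict.contains_empty]
  | succ n ih =>
    rw [dictUpTo_succ, PySem.Dict.contains_insert]
    simp only [Bool.or_eq_true, beq_iff_eq, ih]
    constructor
    · rintro (h | ⟨i, hi, hr⟩)
      · exact ⟨n, by omega, h.symm⟩
      · exact ⟨i, by omega, hr⟩
    · rintro ⟨i, hi, hr⟩
      rcases Nat.lt_succ_iff_lt_or_eq.mp hi with h' | h'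
      · exact Or.inr ⟨i, h', hr⟩
      · subst h'; exact Or.inl hr.symm

theorem get?_dictUpTo_of (p : Int) (n : Nat) (i : Nat)
    (hd : ∀ a b, a < b → b < n → rseq p a ≠ rseq p b) (hi : i < n) :
    (dictUpTo p n).get? (rseq p i) = some (i : Int) := by
  induction n with
  | zero => omega
  | succ n ih =>
    rw [dictUpTo_succ]
    rcases Nat.lt_succ_iff_lt_or_eq.mp hi with h' | h'
    · have hne : rseq p i ≠ rseq p n := hd i n h' (by omega)
      rw [PySem.Dict.get?_insert_of_ne _ _ hne]
      exact ih (fun a b hab hbn => hd a b hab (by omega)) h'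
    · subst h'; exact PySem.Dict.get?_insert_self _ _ _

-- run A's loop to the first bad index N
theorem aLoop_from (p : Int) (N : Nat) (hN : BadN p N) (hgood : ∀ k < N, ¬ BadN p k) :
    ∀ fuel j, j ≤ N → N ≤ j + fuel →
      aLoop p fuel (rseq p j) (dictUpTo p j) (j : Int) = (rseq p N, dictUpTo p N, (N : Int)) := by
  intro fuel
  induction fuel with
  | zero => intro j hj hfj; have : j = N := by omega
            subst this; rfl
  | succ fuel ih =>
    intro j hj hfj
    rcases Nat.lt_or_ge j N with hlt | hge
    · have hgj := hgood j hlt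
      unfold BadN at hgj
      push_neg at hgj
      have hr0 : rseq p j ≠ 0 := hgj.1
      have hc : (dictUpTo p j).contains (rseq p j) = false := by
        rw [← Bool.not_eq_true, contains_dictUpTo]
        push_neg
        exact fun i hi => hgj.2 i hi
      show aLoop p (fuel+1) (rseq p j) (dictUpTo p j) (j : Int) = _
      rw [aLoop, if_pos ⟨hr0, hc⟩]
      have h1 : PySem.Int.mod (rseq p j * 10) p = rseq p (j+1) := rfl
      have h2 : (dictUpTo p j).insert (rseq p j) (j : Int) = dictUpTo p (j+1) :=
        (dictUpTo_succ p j).symm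
      have h3 : (j : Int) + 1 = ((j+1 : Nat) : Int) := by push_cast; ring
      rw [h1, h2, h3]
      exact ih (j+1) (by omega) (by omega)
    · have hje : j = N := by omega
      subst hje
      show aLoop p (fuel+1) (rseq p j) (dictUpTo p j) (j : Int) = _
      rw [aLoop]
      have hcond : ¬ (rseq p j ≠ 0 ∧ (dictUpTo p j).contains (rseq p j) = false) := by
        unfold BadN at hN
        rcases hN with h0 | ⟨i, hi, hr⟩
        · intro h; exact h.1 h0
        · intro h
          have := (contains_dictUpTo p j (rseq p j)).mpr ⟨i, hi, hr⟩
          rw [h.2] at this; exact Bool.false_ne_true this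
      rw [if_neg hcond]

-- positions stored in the dict never exceed pos, hence period ≥ 0 whatever the fuel
theorem aLoop_pos (p : Int) : ∀ fuel r seen pos, 0 ≤ pos →
    (∀ k v, seen.get? k = some v → 0 ≤ v ∧ v ≤ pos) →
    0 ≤ (aLoop p fuel r seen pos).2.2 ∧
    (∀ k v, (aLoop p fuel r seen pos).2.1.get? k = some v →
      0 ≤ v ∧ v ≤ (aLoop p fuel r seen pos).2.2) := by
  intro fuel
  induction fuel with
  | zero => intro r seen pos hpos hseen; exact ⟨hpos, hseen⟩
  | succ fuel ih =>
    intro r seen pos hpos hseen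
    rw [aLoop]
    split_ifs with hc
    · apply ih _ _ _ (by omega)
      intro k v hkv
      by_cases hk : k = r
      · subst hk
        rw [PySem.Dict.get?_insert_self] at hkv
        have : v = pos := by simpa using hkv.symm
        omega
      · rw [PySem.Dict.get?_insert_of_ne _ _ hk] at hkv
        have := hseen k v hkv
        omega
    · exact ⟨hpos, hseen⟩

theorem a_false_of_neg (p : Int) (hp : p < 0) : is_reptend_prime_py p = false := by
  unfold is_reptend_prime_py
  rw [if_neg (by omega : ¬(p = 2 ∨ p = 5))]
  have h := aLoop_pos p (2 * p.natAbs + 2) 1 PySem.Dict.empty 0 le_rfl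
    (by intro k v hkv; rw [PySem.Dict.get?_empty] at hkv; cases hkv)
  set st := aLoop p (2 * p.natAbs + 2) 1 PySem.Dict.empty 0 with hst
  have hper : (0:Int) ≤ (if st.1 = 0 then st.2.2 else st.2.2 - st.2.1.getD st.1 0) := by
    split_ifs
    · exact h.1
    · rw [PySem.Dict.getD_eq_get?_getD]
      rcases hg : st.2.1.get? st.1 with _ | v
      · simpa using h.1
      · have := h.2 _ _ hg
        simp only [Option.getD_some]
        omega
  simp only [decide_eq_false_iff_not]
  omega

-- ---------- lemmas (number theory bridge) ----------
theorem rseq_eq_cast' (P : Nat) (hP : 2 ≤ P) (k : Nat) :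
    rseq (P : Int) k = ((10^k % P : Nat) : Int) := by
  induction k with
  | zero =>
    show (1:Int) = _
    rw [pow_zero, Nat.mod_eq_of_lt (by omega)]
    simp
  | succ k ih =>
    show PySem.Int.mod (rseq (P : Int) k * 10) (P : Int) = _
    rw [ih]
    have h10 : ((10^k % P : Nat) : Int) * 10 = (((10^k % P) * 10 : Nat) : Int) := by
      push_cast; ring
    rw [h10, PySem.Int.mod_natCast]
    congr 1
    rw [pow_succ]
    conv_rhs => rw [Nat.mul_mod]
    conv_lhs => rw [Nat.mul_mod, Nat.mod_mod_of_dvd _ (dvd_refl P)]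

theorem rseq_eq_cast (p : Int) (hp : 2 ≤ p) (k : Nat) :
    rseq p k = ((10^k % p.toNat : Nat) : Int) := by
  have hpt : ((p.toNat : Nat) : Int) = p := Int.toNat_of_nonneg (by omega)
  conv_lhs => rw [← hpt]
  exact rseq_eq_cast' p.toNat (by omega) k

theorem exists_badN (p : Int) (hp : 3 ≤ p) : ∃ k, k ≤ p.toNat ∧ BadN p k := by
  by_contra hcon
  push_neg at hcon
  -- all of rseq 0 .. rseq P are nonzero and pairwise distinct: pigeonhole into Ioo 0 P
  set P := p.toNat with hPdef
  have hP : 3 ≤ P := by omega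
  have hmaps : ∀ k, k ≤ P → (rseq p k).toNat ∈ Finset.Ioo 0 P := by
    intro k hk
    have hbad := hcon k hk
    unfold BadN at hbad
    push_neg at hbad
    have h1 : rseq p k = ((10^k % P : Nat) : Int) := rseq_eq_cast p (by omega) k
    have h2 : 10^k % P < P := Nat.mod_lt _ (by omega)
    have h3 : rseq p k ≠ 0 := hbad.1
    simp only [Finset.mem_Ioo]
    omega
  have hinj : ∀ i j, i ≤ P → j ≤ P → (rseq p i).toNat = (rseq p j).toNat → i = j := by
    intro i j hi hj hij
    have hvi : rseq p i = ((10^i % P : Nat) : Int) := rseq_eq_cast p (by omega) i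
    have hvj : rseq p j = ((10^j % P : Nat) : Int) := rseq_eq_cast p (by omega) j
    have heq : rseq p i = rseq p j := by omega
    rcases Nat.lt_trichotomy i j with h | h | h
    · have hbad := hcon j hj
      unfold BadN at hbad
      push_neg at hbad
      exact absurd heq (hbad.2 i h)
    · exact h
    · have hbad := hcon i hi
      unfold BadN at hbad
      push_neg at hbad
      exact absurd heq.symm (hbad.2 j h)
  have hcard : (Finset.Ioo 0 P).card < (Finset.range (P+1)).card := by
    rw [Nat.card_Ioo, Finset.card_range]
    omega
  obtain ⟨i, hi, j, hj, hne, hfe⟩ :=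
    Finset.exists_ne_map_eq_of_card_lt_of_maps_to hcard
      (fun k hk => hmaps k (by simpa [Nat.lt_succ_iff] using hk))
  exact hne (hinj i j (by simpa [Nat.lt_succ_iff] using hi)
    (by simpa [Nat.lt_succ_iff] using hj) hfe)

theorem rseq_nonneg_val (p : Int) (hp : 3 ≤ p) (k : Nat) :
    (rseq p k).toNat = 10^k % p.toNat ∧ 0 ≤ rseq p k := by
  rw [rseq_eq_cast p (by omega) k]
  exact ⟨Int.toNat_natCast _, Int.natCast_nonneg _⟩

-- the first N remainders are nonzero and pairwise distinct, and they live in (0, P):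
-- there cannot be P of them
theorem rseq_pigeon (p : Int) (hp : 3 ≤ p) (N : Nat) (hNge : p.toNat ≤ N)
    (hne0 : ∀ k, k < N → rseq p k ≠ 0)
    (hd : ∀ a b, a < b → b < N → rseq p a ≠ rseq p b) : False := by
  set P := p.toNat with hPdef
  have hmaps : ∀ k, k ∈ Finset.range N → (rseq p k).toNat ∈ Finset.Ioo 0 P := by
    intro k hk
    rw [Finset.mem_range] at hk
    obtain ⟨hv, hnn⟩ := rseq_nonneg_val p hp k
    rw [← hPdef] at hv
    have h2 : 10^k % P < P := Nat.mod_lt _ (by omega)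
    have h3 := hne0 k hk
    simp only [Finset.mem_Ioo]
    omega
  have hcard : (Finset.Ioo 0 P).card < (Finset.range N).card := by
    rw [Nat.card_Ioo, Finset.card_range]; omega
  obtain ⟨i, hi, j, hj, hne, hfe⟩ :=
    Finset.exists_ne_map_eq_of_card_lt_of_maps_to hcard hmaps
  rw [Finset.mem_range] at hi hj
  have heq : rseq p i = rseq p j := by
    obtain ⟨_, hni⟩ := rseq_nonneg_val p hp i
    obtain ⟨_, hnj⟩ := rseq_nonneg_val p hp j
    omega
  rcases Nat.lt_trichotomy i j with h | h | h
  · exact hd i j h hj heq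
  · exact hne h
  · exact hd j i h hi heq.symm

-- with exactly P-1 distinct nonzero remainders, every value in (0, P) is attained
theorem rseq_surj (p : Int) (hp : 3 ≤ p)
    (hne0 : ∀ k, k < p.toNat - 1 → rseq p k ≠ 0)
    (hd : ∀ a b, a < b → b < p.toNat - 1 → rseq p a ≠ rseq p b)
    (v : Nat) (hv : v ∈ Finset.Ioo 0 p.toNat) :
    ∃ i, i < p.toNat - 1 ∧ (rseq p i).toNat = v := by
  set P := p.toNat with hPdef
  have hmaps : ∀ k, k ∈ Finset.range (P-1) → (rseq p k).toNat ∈ Finset.Ioo 0 P := by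
    intro k hk
    rw [Finset.mem_range] at hk
    obtain ⟨hval, hnn⟩ := rseq_nonneg_val p hp k
    rw [← hPdef] at hval
    have h2 : 10^k % P < P := Nat.mod_lt _ (by omega)
    have h3 := hne0 k hk
    simp only [Finset.mem_Ioo]
    omega
  have hinj : Set.InjOn (fun k => (rseq p k).toNat) (Finset.range (P-1)) := by
    intro a ha b hb hab
    rw [Finset.coe_range, Set.mem_Iio] at ha hb
    by_contra hne
    have heq : rseq p a = rseq p b := by
      obtain ⟨_, hna⟩ := rseq_nonneg_val p hp a
      obtain ⟨_, hnb⟩ := rseq_nonneg_val p hp b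
      simp only at hab
      omega
    rcases Nat.lt_trichotomy a b with h | h | h
    · exact hd a b h hb heq
    · exact hne h
    · exact hd b a h ha heq.symm
  have hsub : (Finset.range (P-1)).image (fun k => (rseq p k).toNat) ⊆ Finset.Ioo 0 P := by
    intro x hx
    obtain ⟨k, hk, rfl⟩ := Finset.mem_image.mp hx
    exact hmaps k hk
  have hcardim : ((Finset.range (P-1)).image (fun k => (rseq p k).toNat)).card = P - 1 := by
    rw [Finset.card_image_of_injOn hinj, Finset.card_range]
  have heq : (Finset.range (P-1)).image (fun k => (rseq p k).toNat) = Finset.Ioo 0 P :=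
    Finset.eq_of_subset_of_card_le hsub (by rw [hcardim, Nat.card_Ioo]; omega)
  rw [← heq] at hv
  obtain ⟨i, hi, hfi⟩ := Finset.mem_image.mp hv
  exact ⟨i, Finset.mem_range.mp hi, hfi⟩

theorem coprime_of_powmod_one (p : Int) (hp : 3 ≤ p)
    (h1 : 10^(p.toNat - 1) % p.toNat = 1) : Nat.Coprime 10 p.toNat := by
  set P := p.toNat with hPdef
  have hg10 : Nat.gcd 10 P ∣ 10^(P-1) :=
    (Nat.gcd_dvd_left 10 P).trans (dvd_pow_self 10 (by omega : P - 1 ≠ 0))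
  have hgP : Nat.gcd 10 P ∣ P := Nat.gcd_dvd_right 10 P
  have hdm := Nat.div_add_mod (10^(P-1)) P
  have hsub : 10^(P-1) - P * (10^(P-1) / P) = 1 := by omega
  have : Nat.gcd 10 P ∣ 1 := by
    rw [← hsub]
    exact Nat.dvd_sub hg10 (hgP.mul_right _)
  exact Nat.dvd_one.mp this

-- A's verdict for p ≥ 3, p ≠ 5
theorem a_iff_scond (p : Int) (hp : 3 ≤ p) (hp5 : p ≠ 5) :
    (is_reptend_prime_py p = true ↔ SCond p.toNat) := by
  set P := p.toNat with hPdef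
  have hP3 : 3 ≤ P := by omega
  have hpP : p = (P : Int) := by omega
  have hcast : ∀ k, rseq p k = ((10^k % P : Nat) : Int) := rseq_eq_cast p (by omega)
  obtain ⟨k₀, hk₀P, hk₀bad⟩ := exists_badN p hp
  have hex : ∃ k, BadN p k := ⟨k₀, hk₀bad⟩
  letI : DecidablePred (BadN p) := fun k => by unfold BadN; infer_instance
  set N := Nat.find hex with hNdef
  have hNbad : BadN p N := Nat.find_spec hex
  have hNmin : ∀ k, k < N → ¬ BadN p k := fun k hk => Nat.find_min hex hk
  have hNP : N ≤ P := le_trans (Nat.find_min' hex hk₀bad) hk₀P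
  have hd : ∀ a b, a < b → b < N → rseq p a ≠ rseq p b :=
    fun a b hab hbN heq => hNmin b hbN (Or.inr ⟨a, hab, heq⟩)
  have hne0 : ∀ k, k < N → rseq p k ≠ 0 := fun k hk h0 => hNmin k hk (Or.inl h0)
  have hrun : aLoop p (2 * p.natAbs + 2) 1 PySem.Dict.empty 0
      = (rseq p N, dictUpTo p N, (N : Int)) := by
    have h0 := aLoop_from p N hNbad hNmin (2 * p.natAbs + 2) 0 (by omega)
      (by have : p.natAbs = P := by omega
          omega)
    simpa using h0
  unfold is_reptend_prime_py
  rw [if_neg (by omega : ¬(p = 2 ∨ p = 5))]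
  simp only [hrun]
  rw [decide_eq_true_eq]
  constructor
  · -- A returned True: the period is p - 1
    intro hper
    by_cases hz : rseq p N = 0
    · -- termination case: p | 10^N; impossible together with period = p - 1
      rw [if_pos hz] at hper
      exfalso
      have hN1 : N = P - 1 := by omega
      have hdvd : P ∣ 10^N := by
        apply Nat.dvd_of_mod_eq_zero
        have := hcast N
        rw [hz] at this
        exact_mod_cast this.symm
      have hqp : (P.minFac).Prime := Nat.minFac_prime (by omega)
      have hq10 : P.minFac ∣ 10 := hqp.dvd_of_dvd_pow ((Nat.minFac_dvd P).trans hdvd)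
      have hqP : P.minFac ∣ P := Nat.minFac_dvd P
      -- every remainder after step 0 is divisible by minFac P
      have hqr : ∀ i, 1 ≤ i → P.minFac ∣ (10^i % P) := by
        intro i hi
        have h1' : P.minFac ∣ 10^i := hq10.trans (dvd_pow_self 10 (by omega))
        have hdm := Nat.div_add_mod (10^i) P
        have h2' : 10^i % P = 10^i - P * (10^i / P) := by omega
        rw [h2']
        exact Nat.dvd_sub h1' (hqP.mul_right _)
      have hq25 : P.minFac = 2 ∨ P.minFac = 5 := by
        have h2 := hqp.two_le
        have hle := Nat.le_of_dvd (by norm_num) hq10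
        rcases (Nat.le_of_dvd (by norm_num) hq10).lt_or_eq with h | h
        · interval_cases h' : P.minFac <;> revert hq10 <;> revert hqp <;> decide
        · exfalso
          rw [h] at hqp
          exact absurd hqp (by decide)
      have hne0' : ∀ k, k < P - 1 → rseq p k ≠ 0 := by
        intro k hk; exact hne0 k (by omega)
      have hd' : ∀ a b, a < b → b < P - 1 → rseq p a ≠ rseq p b := by
        intro a b hab hb; exact hd a b hab (by omega)
      -- pick a small value not divisible by minFac P and different from 1
      rcases hq25 with hq2 | hq5
      · have hP4 : 4 ≤ P := by
          rw [hq2] at hqP; omega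
        obtain ⟨i, hiN, hiv⟩ := rseq_surj p hp hne0' hd' 3
          (by simp only [Finset.mem_Ioo]; omega)
        rcases Nat.eq_zero_or_pos i with h0 | h1'
        · subst h0
          simp [rseq] at hiv
        · have := hqr i h1'
          obtain ⟨hval, _⟩ := rseq_nonneg_val p hp i
          rw [← hPdef] at hval
          rw [hq2] at this
          omega
      · have hP5 : 5 ∣ P := by rw [hq5] at hqP; exact hqP
        obtain ⟨i, hiN, hiv⟩ := rseq_surj p hp hne0' hd' 2
          (by simp only [Finset.mem_Ioo]; omega)
        rcases Nat.eq_zero_or_pos i with h0 | h1'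
        · subst h0
          simp [rseq] at hiv
        · have := hqr i h1'
          obtain ⟨hval, _⟩ := rseq_nonneg_val p hp i
          rw [← hPdef] at hval
          rw [hq5] at this
          omega
    · -- repeat case
      rw [if_neg hz] at hper
      obtain ⟨i₁, hi₁N, hi₁eq⟩ : ∃ i < N, rseq p i = rseq p N := by
        rcases hNbad with h0 | h' 
        · exact absurd h0 hz
        · exact h'
      have hget : (dictUpTo p N).get? (rseq p N) = some (i₁ : Int) := by
        rw [← hi₁eq]; exact get?_dictUpTo_of p N i₁ hd hi₁N
      rw [PySem.Dict.getD_eq_get?_getD, hget] at hper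
      simp only [Option.getD_some] at hper
      by_cases hi0 : i₁ = 0
      · subst hi0
        have hN1 : N = P - 1 := by
          simp only [Nat.cast_zero, sub_zero] at hper
          omega
        have hr1 : rseq p N = 1 := by
          rw [← hi₁eq]; rfl
        have h1 : 10^(P-1) % P = 1 := by
          have := hcast N
          rw [hr1] at this
          rw [← hN1]
          exact_mod_cast this.symm
        refine ⟨h1, ?_⟩
        intro k hk1 hk2 hc
        apply hd 0 k hk1 (by omega)
        show (1 : Int) = rseq p k
        rw [hcast k, hc]
        rfl
      · -- the first repeat cannot close a cycle that skips the start
        exfalso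
        have hNge : P ≤ N := by omega
        exact rseq_pigeon p hp N hNge hne0 hd
  · -- SCond P: the loop runs exactly P-1 steps and returns to remainder 1
    rintro ⟨h1, h2⟩
    have hcop := coprime_of_powmod_one p hp h1
    have hgood : ∀ k, k < P - 1 → ¬ BadN p k := by
      intro k hk hbad
      rcases hbad with h0 | ⟨i, hik, hieq⟩
      · have hmod : 10^k % P = 0 := by
          have := hcast k
          rw [h0] at this
          exact_mod_cast this.symm
        have hdvd : P ∣ 10^k := Nat.dvd_of_mod_eq_zero hmod
        have : P = 1 := Nat.Coprime.eq_one_of_dvd ((Nat.Coprime.pow_left k hcop).symm) hdvd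
        omega
      · -- a repeat 10^i ≡ 10^k with i < k < P-1 cancels to 10^(k-i) ≡ 1
        have hmeq : (10:Nat)^i ≡ 10^k [MOD P] := by
          show 10^i % P = 10^k % P
          have hci := hcast i
          have hck := hcast k
          rw [hieq] at hci
          omega
        have hsplit : (10:Nat)^k = 10^i * 10^(k-i) := by
          rw [← pow_add]
          congr 1
          omega
        have hone : (10:Nat)^i * 1 ≡ 10^i * 10^(k-i) [MOD P] := by
          rw [mul_one, ← hsplit]
          exact hmeq
        have hcan : (1:Nat) ≡ 10^(k-i) [MOD P] :=
          Nat.ModEq.cancel_left_of_coprime ((Nat.Coprime.pow_left i hcop).symm) hone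
        have hval : 10^(k-i) % P = 1 := by
          have := hcan.symm
          unfold Nat.ModEq at this
          rw [Nat.mod_eq_of_lt (by omega : 1 < P)] at this
          exact this
        exact h2 (k-i) (by omega) (by omega) hval
    have hbadP : BadN p (P-1) := by
      refine Or.inr ⟨0, by omega, ?_⟩
      show (1 : Int) = rseq p (P-1)
      rw [hcast (P-1), h1]
      rfl
    have hNeq : N = P - 1 := by
      have hle : N ≤ P - 1 := Nat.find_min' hex hbadP
      rcases Nat.lt_or_ge N (P-1) with h | h
      · exact absurd hNbad (hgood N h)
      · omega
    have hr1 : rseq p N = 1 := by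
      rw [hNeq, hcast (P-1), h1]
      rfl
    rw [if_neg (by rw [hr1]; exact one_ne_zero)]
    have hget : (dictUpTo p N).get? (rseq p N) = some ((0:Nat) : Int) := by
      have := get?_dictUpTo_of p N 0 hd (by omega)
      rwa [show rseq p 0 = rseq p N by rw [hr1]; rfl] at this
    rw [PySem.Dict.getD_eq_get?_getD, hget]
    simp only [Option.getD_some, Nat.cast_zero, sub_zero]
    omega

-- ---------- lemmas (B side) ----------
theorem stripN_spec (q : Nat) (hq : q.Prime) : ∀ fuel m, 1 ≤ m → m ≤ fuel →
    (stripN q fuel m ∣ m ∧ 1 ≤ stripN q fuel m ∧ ¬ q ∣ stripN q fuel m ∧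
      ∀ r, r.Prime → r ∣ m → r ≠ q → r ∣ stripN q fuel m) := by
  intro fuel
  induction fuel with
  | zero => intro m hm hfuel; omega
  | succ fuel ih =>
    intro m hm hfuel
    simp only [stripN]
    by_cases h : m % q = 0
    · have hdvd : q ∣ m := Nat.dvd_of_mod_eq_zero h
      have hqm : q ≤ m := Nat.le_of_dvd (by omega) hdvd
      have hmq1 : 1 ≤ m / q := Nat.div_pos hqm hq.pos
      have hmqlt : m / q < m := Nat.div_lt_self (by omega) hq.one_lt
      obtain ⟨ih1, ih2, ih3, ih4⟩ := ih (m / q) hmq1 (by omega)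
      have hmeq : m / q * q = m := Nat.div_mul_cancel hdvd
      have hdvdm : m / q ∣ m := ⟨q, hmeq.symm⟩
      rw [if_pos h]
      refine ⟨ih1.trans hdvdm, ih2, ih3, ?_⟩
      intro r hr hrm hrq
      apply ih4 r hr ?_ hrq
      have : r ∣ (m / q) * q := by rw [hmeq]; exact hrm
      rcases (Nat.Prime.dvd_mul hr).mp this with h' | h'
      · exact h'
      · exact absurd ((Nat.prime_dvd_prime_iff_eq hr hq).mp h') hrq
    · rw [if_neg h]
      exact ⟨dvd_refl m, hm, fun hd => by obtain ⟨c, rfl⟩ := hd; exact h (Nat.mul_mod_right q c), fun r _ hrm _ => hrm⟩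

theorem bN_spec (P n : Nat) : ∀ fuel m q, 2 ≤ q → 1 ≤ m →
    (∀ r, r.Prime → r ∣ m → q ≤ r) → m + 2 ≤ fuel + q →
    (((bN P n fuel m q).1 = true ∧
        ¬(1 < (bN P n fuel m q).2 ∧ 10^(n / (bN P n fuel m q).2) % P = 1)) ↔
      (∀ r, r.Prime → r ∣ m → 10^(n/r) % P ≠ 1)) := by
  intro fuel
  induction fuel with
  | zero =>
    intro m q hq hm hfac hfuel
    -- the loop is never entered: every prime factor of m would be ≥ q ≥ m + 2 > m, so m = 1
    have hm1 : m = 1 := by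
      by_contra hne
      have hpf := Nat.minFac_prime hne
      have h1 := hfac _ hpf (Nat.minFac_dvd m)
      have h2 := Nat.minFac_le (by omega : 0 < m)
      omega
    subst hm1
    simp only [bN]
    constructor
    · intro _ r hr hrm
      exact absurd (Nat.dvd_one.mp hrm) hr.ne_one
    · intro _
      exact ⟨by simp, by simp⟩
  | succ fuel ih =>
    intro m q hq hm hfac hfuel
    have hbn : bN P n (fuel+1) m q =
        (if q * q ≤ m then
          if m % q = 0 then
            if 10^(n / q) % P = 1 then (false, m)
            else bN P n fuel (stripN q m m) (q + 1)
          else bN P n fuel m (q + 1)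
        else (true, m)) := rfl
    rw [hbn]
    by_cases h1 : q * q ≤ m
    · rw [if_pos h1]
      by_cases h2 : m % q = 0
      · -- q divides m, hence q is prime (its least prime factor divides m so is ≥ q, yet ≤ q)
        have hqdvd : q ∣ m := Nat.dvd_of_mod_eq_zero h2
        have hqprime : q.Prime := by
          have hne : q ≠ 1 := by omega
          have h3 := hfac _ (Nat.minFac_prime hne) ((Nat.minFac_dvd q).trans hqdvd)
          have h4 := Nat.minFac_le (by omega : 0 < q)
          have h5 : q.minFac = q := by omega
          rw [← h5]; exact Nat.minFac_prime hne
        rw [if_pos h2]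
        by_cases h3 : 10^(n / q) % P = 1
        · rw [if_pos h3]
          exact ⟨fun h => (Bool.false_ne_true h.1).elim,
                 fun hall => (hall q hqprime hqdvd h3).elim⟩
        · rw [if_neg h3]
          obtain ⟨hs1, hs2, hs3, hs4⟩ := stripN_spec q hqprime m m hm le_rfl
          have hrec := ih (stripN q m m) (q+1) (by omega) hs2
            (by
              intro r hr hrm
              have hq' := hfac r hr (hrm.trans hs1)
              by_cases hrq : r = q
              · subst hrq; exact absurd hrm hs3
              · omega)
            (by
              have := Nat.le_of_dvd (by omega) hs1
              omega)
          rw [hrec]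
          constructor
          · intro hall r hr hrm
            by_cases hrq : r = q
            · subst hrq; exact h3
            · exact hall r hr (hs4 r hr hrm hrq)
          · intro hall r hr hrm
            exact hall r hr (hrm.trans hs1)
      · rw [if_neg h2]
        have hrec := ih m (q+1) (by omega) hm
          (by
            intro r hr hrm
            have hq' := hfac r hr hrm
            by_cases hrq : r = q
            · subst hrq
              obtain ⟨c, rfl⟩ := hrm
              exact absurd (Nat.mul_mod_right r c) h2
            · omega)
          (by omega)
        rw [hrec]
    · rw [if_neg h1]
      -- the loop exits: m = 1 or (all prime factors of m ≥ q and q*q > m) forces m prime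
      by_cases hm1 : m = 1
      · subst hm1
        constructor
        · intro _ r hr hrm
          exact absurd (Nat.dvd_one.mp hrm) hr.ne_one
        · intro _
          exact ⟨rfl, by simp⟩
      · have hmp : m.Prime := by
          by_contra hnp
          have h4 := Nat.minFac_sq_le_self (by omega : 0 < m) hnp
          have h3 := hfac _ (Nat.minFac_prime hm1) (Nat.minFac_dvd m)
          exact h1 (le_trans (Nat.mul_le_mul h3 h3) (by rw [← pow_two]; exact h4))
        constructor
        · intro h r hr hrm
          have hrm' : r = m := (Nat.prime_dvd_prime_iff_eq hr hmp).mp hrm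
          rw [hrm']
          intro hc
          exact h.2 ⟨hmp.one_lt, hc⟩
        · intro hall
          exact ⟨rfl, fun hc => hall m hmp (dvd_refl m) hc.2⟩

theorem stripLoop_cast (q m : Nat) (hq : 0 < q) :
    ∀ fuel, stripLoop (q : Int) fuel (m : Int) = ((stripN q fuel m : Nat) : Int) := by
  intro fuel
  induction fuel generalizing m with
  | zero => rfl
  | succ fuel ih =>
    show (if PySem.Int.mod (m:Int) (q:Int) = 0 then
        stripLoop (q:Int) fuel (PySem.Int.floordiv (m:Int) (q:Int)) else (m:Int)) = _
    rw [PySem.Int.mod_natCast, PySem.Int.floordiv_natCast]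
    show _ = ((if m % q = 0 then stripN q fuel (m / q) else m : Nat) : Int)
    by_cases h : m % q = 0
    · rw [if_pos (show ((m % q : Nat) : Int) = 0 by exact_mod_cast h), if_pos h]
      exact ih (m / q)
    · rw [if_neg (show ¬((m % q : Nat) : Int) = 0 by exact_mod_cast h), if_neg h]

theorem bLoop_cast (p : Int) (hp : 0 < p) (n : Nat) : ∀ fuel (m q : Nat), 0 < q →
    bLoop p (n : Int) fuel (m : Int) (q : Int) =
      ((bN p.toNat n fuel m q).1, ((bN p.toNat n fuel m q).2 : Int)) := by
  lift p to Nat using (by omega : (0:Int) ≤ p) with P hPp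
  have hP0 : 0 < P := by exact_mod_cast hp
  simp only [Int.toNat_natCast]
  intro fuel
  induction fuel with
  | zero => intro m q hq; rfl
  | succ fuel ih =>
    intro m q hq
    have hpow : ∀ e : Nat, (PySem.Int.powMod 10 e (P : Int) = 1) ↔ 10^e % P = 1 := by
      intro e
      rw [PySem.Int.powMod_eq_emod _ _ (by exact_mod_cast hP0)]
      constructor <;> intro h <;> exact_mod_cast h
    show (if (q:Int) * q ≤ (m:Int) then
            if PySem.Int.mod (m:Int) (q:Int) = 0 then
              if PySem.Int.powMod 10 (PySem.Int.floordiv (n:Int) (q:Int)).toNat (P:Int) = 1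
                then (false, (m:Int))
              else bLoop (P:Int) (n:Int) fuel (stripLoop (q:Int) (m:Int).natAbs (m:Int)) ((q:Int) + 1)
            else bLoop (P:Int) (n:Int) fuel (m:Int) ((q:Int) + 1)
          else (true, (m:Int))) = _
    rw [PySem.Int.mod_natCast, PySem.Int.floordiv_natCast, Int.toNat_natCast,
        Int.natAbs_natCast, stripLoop_cast q m hq]
    show _ = ((bN P n (fuel+1) m q).1, ((bN P n (fuel+1) m q).2 : Int))
    have hbn : bN P n (fuel+1) m q =
        (if q * q ≤ m then
          if m % q = 0 then
            if 10^(n / q) % P = 1 then (false, m)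
            else bN P n fuel (stripN q m m) (q + 1)
          else bN P n fuel m (q + 1)
        else (true, m)) := rfl
    rw [hbn]
    by_cases h1 : q * q ≤ m
    · rw [if_pos (by exact_mod_cast h1 : (q:Int) * q ≤ (m:Int)), if_pos h1]
      by_cases h2 : m % q = 0
      · rw [if_pos (by exact_mod_cast h2 : ((m % q : Nat) : Int) = 0), if_pos h2]
        by_cases h3 : 10^(n / q) % P = 1
        · rw [if_pos ((hpow (n / q)).mpr h3), if_pos h3]
        · rw [if_neg (fun hc => h3 ((hpow (n / q)).mp hc)), if_neg h3]
          have hq1 : ((q : Int) + 1) = ((q + 1 : Nat) : Int) := by push_cast; ring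
          rw [hq1]
          exact ih (stripN q m m) (q+1) (by omega)
      · rw [if_neg (by exact_mod_cast h2 : ¬((m % q : Nat) : Int) = 0), if_neg h2]
        have hq1 : ((q : Int) + 1) = ((q + 1 : Nat) : Int) := by push_cast; ring
        rw [hq1]
        exact ih m (q+1) (by omega)
    · rw [if_neg (by exact_mod_cast h1 : ¬((q:Int) * q ≤ (m:Int))), if_neg h1]

-- 10^k ≡ 1 (mod P) in Nat arithmetic versus in ZMod P
theorem powmod_one_iff (P : Nat) (hP : 3 ≤ P) (k : Nat) :
    (10^k % P = 1) ↔ ((10 : ZMod P)^k = 1) := by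
  have hcast : ((10^k : Nat) : ZMod P) = (10 : ZMod P)^k := by push_cast; rfl
  have h1 : ((1 : Nat) : ZMod P) = (1 : ZMod P) := Nat.cast_one
  rw [← hcast, ← h1, ZMod.natCast_eq_natCast_iff]
  unfold Nat.ModEq
  rw [Nat.mod_eq_of_lt (by omega : 1 < P)]

-- SCond is exactly "10^(P-1) ≡ 1 and 10^((P-1)/q) ≢ 1 for every prime q ∣ P-1"
theorem scond_iff_factors (P : Nat) (hP : 3 ≤ P) :
    SCond P ↔ (10^(P-1) % P = 1 ∧
      ∀ q, q.Prime → q ∣ (P-1) → 10^((P-1)/q) % P ≠ 1) := by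
  unfold SCond
  constructor
  · rintro ⟨h1, h2⟩
    refine ⟨h1, ?_⟩
    intro q hq hqd hc
    have hd1 : 0 < (P-1)/q := Nat.div_pos (Nat.le_of_dvd (by omega) hqd) hq.pos
    have hd2 : (P-1)/q < P-1 := Nat.div_lt_self (by omega) hq.one_lt
    exact h2 _ hd1 hd2 hc
  · rintro ⟨h1, h2⟩
    refine ⟨h1, ?_⟩
    have hord : orderOf (10 : ZMod P) = P - 1 :=
      orderOf_eq_of_pow_and_pow_div_prime (by omega)
        ((powmod_one_iff P hP _).mp h1)
        (fun q hq hqd hc => h2 q hq hqd ((powmod_one_iff P hP _).mpr hc))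
    intro k hk1 hk2 hc
    have : orderOf (10 : ZMod P) ∣ k :=
      orderOf_dvd_iff_pow_eq_one.mpr ((powmod_one_iff P hP _).mp hc)
    rw [hord] at this
    have := Nat.le_of_dvd hk1 this
    omega

theorem b_iff_scond (p : Int) (hp : 3 ≤ p) (hp5 : p ≠ 5) :
    (is_reptend_prime_py_alt p = true ↔ SCond p.toNat) := by
  set P := p.toNat with hPdef
  have hP3 : 3 ≤ P := by omega
  have hp0 : (0:Int) < p := by omega
  have hpm1 : p - 1 = ((P - 1 : Nat) : Int) := by omega
  have hpP : p = (P : Int) := by omega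
  have hpow : ∀ e : Nat, (PySem.Int.powMod 10 e p = 1) ↔ (10^e % P = 1) := by
    intro e
    rw [PySem.Int.powMod_eq_emod _ _ hp0, hpP]
    constructor <;> intro h <;> exact_mod_cast h
  unfold is_reptend_prime_py_alt
  rw [if_neg (by omega : ¬(p < 3 ∨ p = 5))]
  simp only []
  have htn : (p - 1).toNat = P - 1 := by omega
  rw [htn]
  by_cases h1 : 10^(P-1) % P = 1
  · rw [if_neg (by simpa using (hpow (P-1)).mpr h1)]
    rw [hpm1, Int.natAbs_natCast, hpP]
    rw [show (2:Int) = ((2:Nat):Int) from rfl]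
    rw [bLoop_cast (P:Int) (by exact_mod_cast (by omega : 0 < P)) (P-1) (P-1+2) (P-1) 2 (by omega)]
    rw [Int.toNat_natCast]
    have hspec := bN_spec P (P-1) ((P-1)+2) (P-1) 2 le_rfl (by omega)
      (fun r hr _ => hr.two_le) (by omega)
    set B := bN P (P-1) (P-1+2) (P-1) 2 with hB
    simp only []
    -- reduce the final modular exponentiation to Nat
    have hfd : (PySem.Int.floordiv ((P-1 : Nat) : Int) ((B.2 : Nat) : Int)).toNat
        = (P-1) / B.2 := by
      rw [PySem.Int.floordiv_natCast, Int.toNat_natCast]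
    have hpow' : ∀ e : Nat, (PySem.Int.powMod 10 e ((P:Nat) : Int) = 1) ↔ (10^e % P = 1) := by
      intro e; rw [← hpP]; exact hpow e
    constructor
    · intro hval
      refine (scond_iff_factors P hP3).mpr ⟨h1, ?_⟩
      apply hspec.mp
      by_cases hb1 : B.1 = false
      · rw [if_pos hb1] at hval; exact absurd hval (by simp)
      · rw [if_neg hb1] at hval
        refine ⟨by simpa using hb1, ?_⟩
        rintro ⟨hlt, hpe⟩
        rw [if_pos ⟨by exact_mod_cast hlt, by rw [hfd]; exact (hpow' _).mpr hpe⟩] at hval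
        exact absurd hval (by simp)
    · intro hS
      obtain ⟨hb1, hb2⟩ := hspec.mpr ((scond_iff_factors P hP3).mp hS).2
      rw [if_neg (by simp [hb1])]
      rw [if_neg ?hfin]
      case hfin =>
        rintro ⟨hlt, hpe⟩
        exact hb2 ⟨by exact_mod_cast hlt, by rw [hfd] at hpe; exact (hpow' _).mp hpe⟩
  · rw [if_pos (fun hc => h1 ((hpow _).mp hc))]
    exact ⟨fun h => (Bool.false_ne_true h).elim, fun hS => (h1 hS.1).elim⟩

-- ===== VERDICT (by name: the statement is the Claim_ definition above) =====
theorem is_reptend_prime_py_spec : Claim_equal_is_reptend_prime_py := by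
  intro p _ hpre
  unfold Spec_is_reptend_prime_py
  rcases lt_trichotomy p 0 with hncase | h0 | hpos
  · rw [a_false_of_neg p hncase]
    unfold is_reptend_prime_py_alt
    rw [if_pos (Or.inl (by omega))]
  · exact absurd h0 hpre
  · by_cases h1 : p = 1
    · subst h1; decide
    by_cases h2 : p = 2
    · subst h2; decide
    by_cases h5 : p = 5
    · subst h5; decide
    have h3 : 3 ≤ p := by omega
    have hA := a_iff_scond p h3 h5
    have hB := b_iff_scond p h3 h5
    cases hA' : is_reptend_prime_py p <;> cases hB' : is_reptend_prime_py_alt p <;> simp_all
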